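-- pv_equiv track=rewrite | github.com/zhumao520/yt-dlp-web | api/routes.py | _find_best_available_resolution
-- ===== SOURCE A (Python) =====
-- def _find_best_available_resolution(requested_resolution: str, available_resolutions: set) -> str:
--     """
--     找到最佳可用分辨率（自动降级）
--
--     Args:
--         requested_resolution: 用户请求的分辨率 (如 "1080p")
--         available_resolutions: 可用分辨率集合 (如 {"720p", "480p", "360p"})
--
--     Returns:
--         最佳可用分辨率字符串
--     """
--     # 分辨率优先级（从高到低）
--     resolution_priority = ["4320p", "2160p", "1440p", "1080p", "720p", "480p", "360p", "240p", "144p"]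
--
--     # 如果请求的分辨率直接可用，返回它
--     if requested_resolution in available_resolutions:
--         return requested_resolution
--
--     # 找到请求分辨率在优先级列表中的位置
--     try:
--         requested_index = resolution_priority.index(requested_resolution)
--     except ValueError:
--         # 如果请求的分辨率不在标准列表中，返回最高可用分辨率
--         for res in resolution_priority:
--             if res in available_resolutions:
--                 return res
--         return "medium"  # 如果都没有，返回默认质量
--
--     # 从请求的分辨率开始，向下查找可用的分辨率
--     for i in range(requested_index, len(resolution_priority)):
--         if resolution_priority[i] in available_resolutions:
--             return resolution_priority[i]
--
--     # 如果向下没找到，向上查找（虽然不太可能）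
--     for i in range(requested_index - 1, -1, -1):
--         if resolution_priority[i] in available_resolutions:
--             return resolution_priority[i]
--
--     # 如果还是没找到，返回任何可用的分辨率
--     if available_resolutions:
--         # 按优先级返回最高的可用分辨率
--         for res in resolution_priority:
--             if res in available_resolutions:
--                 return res
--
--     # 最后的备选方案
--     return "medium"
-- ===== SOURCE B (Python) =====
-- def _find_best_available_resolution(requested_resolution: str, available_resolutions: set) -> str:
--     priority = ["4320p", "2160p", "1440p", "1080p", "720p", "480p", "360p", "240p", "144p"]
--     if requested_resolution in available_resolutions:
--         return requested_resolution
--     rank = {res: i for i, res in enumerate(priority)}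
--     candidates = [r for r in available_resolutions if r in rank]
--     if not candidates:
--         return "medium"
--     # down-first-then-up preference around the requested rank (0 = highest if unknown)
--     r0 = rank.get(requested_resolution, 0)
--     n = len(priority)
--     return min(candidates, key=lambda r: rank[r] - r0 if rank[r] >= r0 else n + r0 - rank[r])
-- ===== Notes on version B (the rewrite author's own statement) =====
-- stated objective: alternative
-- what changed: Replaces A's three sequential scans of the priority list (down from the requested index, then up, then a final highest-first scan) by building a rank dictionary once and taking a single min over the available candidates with a down-first-then-up distance key.
import Mathlib
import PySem

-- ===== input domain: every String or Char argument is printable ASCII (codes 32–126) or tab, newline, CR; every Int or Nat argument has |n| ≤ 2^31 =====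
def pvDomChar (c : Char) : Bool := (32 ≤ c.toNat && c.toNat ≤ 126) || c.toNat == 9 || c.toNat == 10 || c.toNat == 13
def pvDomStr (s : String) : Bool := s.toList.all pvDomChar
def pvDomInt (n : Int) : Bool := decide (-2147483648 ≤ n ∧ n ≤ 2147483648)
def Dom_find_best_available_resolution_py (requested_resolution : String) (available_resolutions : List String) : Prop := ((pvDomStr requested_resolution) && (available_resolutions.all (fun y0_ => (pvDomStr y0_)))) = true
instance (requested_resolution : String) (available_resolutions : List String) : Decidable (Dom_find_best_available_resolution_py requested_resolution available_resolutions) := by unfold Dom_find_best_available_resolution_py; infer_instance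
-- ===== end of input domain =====

-- B builds a rank dictionary once and selects the best candidate with a single min over
-- the available resolutions (down-first-then-up distance key), replacing A's three
-- sequential scans of the priority list; objective: alternative decomposition.


-- ===== PORT A =====
-- resolution_priority (shared constant of both Pythons)
def pvPrio : List String := ["4320p", "2160p", "1440p", "1080p", "720p", "480p", "360p", "240p", "144p"]

-- A's 'for res in resolution_priority: if res in available: return res' loop
def pvFirstAvail : List String → List String → Option String
  | [], _ => none
  | r :: rest, avail => if avail.contains r then some r else pvFirstAvail rest avail

-- A's 'for i in range(a, b[, -1]): if resolution_priority[i] in available: return resolution_priority[i]'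
def pvScan (idxs : List Int) (avail : List String) : Option String :=
  idxs.findSome? (fun i =>
    let r := PySem.List.pyGetD pvPrio i ""
    if avail.contains r then some r else none)

def find_best_available_resolution_py (requested_resolution : String) (available_resolutions : List String) : String :=
  if available_resolutions.contains requested_resolution then requested_resolution
  else
    match PySem.List.index? pvPrio requested_resolution with
    | none =>
      -- requested resolution not in the standard list: return highest available
      match pvFirstAvail pvPrio available_resolutions with
      | some res => res
      | none => "medium"
    | some requested_index =>
      match pvScan (PySem.List.pyRange (requested_index : Int) ((pvPrio.length : Nat) : Int) 1) available_resolutions with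
      | some res => res
      | none =>
        match pvScan (PySem.List.pyRange ((requested_index : Int) - 1) (-1) (-1)) available_resolutions with
        | some res => res
        | none =>
          if !available_resolutions.isEmpty then
            match pvFirstAvail pvPrio available_resolutions with
            | some res => res
            | none => "medium"
          else "medium"

-- ===== PORT B =====
-- B's rank = {res: i for i, res in enumerate(priority)}
def pvRank : PySem.Dict String Int :=
  PySem.Dict.ofList ((PySem.List.enumerate pvPrio 0).map (fun p => (p.2, p.1)))

def find_best_available_resolution_py_alt (requested_resolution : String) (available_resolutions : List String) : String :=
  if available_resolutions.contains requested_resolution then requested_resolution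
  else
    let candidates := available_resolutions.filter (fun r => pvRank.contains r)
    if candidates.isEmpty then "medium"
    else
      let r0 := pvRank.getD requested_resolution 0
      let n : Int := (pvPrio.length : Nat)
      match PySem.List.min? candidates (fun r =>
          let k := pvRank.getD r 0
          if r0 ≤ k then k - r0 else n + r0 - k) with
      | some res => res
      | none => "medium"

-- ===== PRECONDITION & SPEC =====
def Spec_find_best_available_resolution_py (requested_resolution : String) (available_resolutions : List String) (out : String) : Prop := out = find_best_available_resolution_py_alt requested_resolution available_resolutions
instance (requested_resolution : String) (available_resolutions : List String) (out : String) : Decidable (Spec_find_best_available_resolution_py requested_resolution available_resolutions out) := by unfold Spec_find_best_available_resolution_py; infer_instance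

-- ===== CLAIM (what is proved, stated in full; the proofs are below) =====
def Claim_equal_find_best_available_resolution_py : Prop := ∀ (requested_resolution : String) (available_resolutions : List String), Dom_find_best_available_resolution_py requested_resolution available_resolutions → Spec_find_best_available_resolution_py requested_resolution available_resolutions (find_best_available_resolution_py requested_resolution available_resolutions)

-- ===== LEMMAS AND PROOFS =====

-- a guarded findSome? is find?
lemma pvFindSome_guard (l : List String) (q : String → Bool) :
    l.findSome? (fun r => if q r then some r else none) = l.find? q := by
  induction l with
  | nil => rfl
  | cons a t ih => by_cases h : q a <;> simp [List.findSome?, List.find?, h, ih]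

lemma pvFirstAvail_eq (l avail : List String) :
    pvFirstAvail l avail = l.find? avail.contains := by
  induction l with
  | nil => rfl
  | cons a t ih => by_cases h : a ∈ avail <;> simp [pvFirstAvail, List.find?, h, ih]

lemma pvScan_eq (idxs : List Int) (avail : List String) :
    pvScan idxs avail
      = (idxs.map (fun j => PySem.List.pyGetD pvPrio j "")).find? avail.contains := by
  rw [← pvFindSome_guard, pvScan, List.findSome?_map]
  rfl

-- the order in which A visits the priority list, starting from index i (down, then up)
def pvOrd (i : Nat) : List String :=
  ((PySem.List.pyRange (i : Int) ((pvPrio.length : Nat) : Int) 1)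
      ++ (PySem.List.pyRange ((i : Int) - 1) (-1) (-1))).map
    (fun j => PySem.List.pyGetD pvPrio j "")

-- membership in pvOrd i vs membership in pvPrio
lemma pvPrio_sub_pvOrd (i : Nat) (r : String) (h : r ∈ pvPrio) : r ∈ pvOrd i := by
  obtain ⟨k, hk, rfl⟩ := List.mem_iff_getElem.1 h
  rw [pvOrd]
  refine List.mem_map.2 ⟨(k : Int), ?_, ?_⟩
  · apply List.mem_append.2
    by_cases hik : i ≤ k
    · exact Or.inl (PySem.List.mem_pyRange_one.2 ⟨by exact_mod_cast hik, by exact_mod_cast hk⟩)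
    · exact Or.inr (PySem.List.mem_pyRange_neg_one.2 ⟨by omega, by omega⟩)
  · rw [PySem.List.pyGetD_natCast]
    exact (List.getD_eq_getElem _ _ hk)

lemma pvOrd_sub_pvPrio (i : Nat) (r : String) (hi : i ≤ pvPrio.length) (h : r ∈ pvOrd i) :
    r ∈ pvPrio := by
  rw [pvOrd] at h
  obtain ⟨j, hj, rfl⟩ := List.mem_map.1 h
  rcases List.mem_append.1 hj with h' | h'
  · obtain ⟨h1, h2⟩ := PySem.List.mem_pyRange_one.1 h'
    exact PySem.List.pyGetD_mem pvPrio "" (by constructor <;> omega)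
  · obtain ⟨h1, h2⟩ := PySem.List.mem_pyRange_neg_one.1 h'
    exact PySem.List.pyGetD_mem pvPrio "" (by constructor <;> omega)

-- A's else-branch (index found at i) equals "first element of pvOrd i available, else medium"
lemma pvA_eq (i : Nat) (avail : List String) :
    (match pvScan (PySem.List.pyRange (i : Int) ((pvPrio.length : Nat) : Int) 1) avail with
     | some res => res
     | none =>
       match pvScan (PySem.List.pyRange ((i : Int) - 1) (-1) (-1)) avail with
       | some res => res
       | none =>
         if !avail.isEmpty then
           match pvFirstAvail pvPrio avail with
           | some res => res
           | none => "medium"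
         else "medium")
      = ((pvOrd i).find? avail.contains).getD "medium" := by
  rw [pvScan_eq, pvScan_eq]
  have hsplit : (pvOrd i).find? avail.contains
      = (((PySem.List.pyRange (i : Int) ((pvPrio.length : Nat) : Int) 1).map
            (fun j => PySem.List.pyGetD pvPrio j "")).find? avail.contains).or
        (((PySem.List.pyRange ((i : Int) - 1) (-1) (-1)).map
            (fun j => PySem.List.pyGetD pvPrio j "")).find? avail.contains) := by
    rw [pvOrd, List.map_append, List.find?_append]
  cases h1 : ((PySem.List.pyRange (i : Int) ((pvPrio.length : Nat) : Int) 1).map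
      (fun j => PySem.List.pyGetD pvPrio j "")).find? avail.contains with
  | some r => simp [hsplit, h1]
  | none =>
    cases h2 : ((PySem.List.pyRange ((i : Int) - 1) (-1) (-1)).map
        (fun j => PySem.List.pyGetD pvPrio j "")).find? avail.contains with
    | some r => simp [hsplit, h1, h2]
    | none =>
      have hnone : ∀ x ∈ pvOrd i, ¬ avail.contains x := by
        intro x hx
        rw [pvOrd, List.map_append] at hx
        rcases List.mem_append.1 hx with h | h
        · exact List.find?_eq_none.1 h1 x h
        · exact List.find?_eq_none.1 h2 x h
      have hfa : pvFirstAvail pvPrio avail = none := by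
        rw [pvFirstAvail_eq]
        exact List.find?_eq_none.2 (fun x hx => hnone x (pvPrio_sub_pvOrd i x hx))
      have hord : (pvOrd i).find? avail.contains = none := List.find?_eq_none.2 hnone
      cases he : avail.isEmpty <;> simp [hsplit, h1, h2, hfa]

lemma pvRank_keys : pvRank.keys = pvPrio := by decide

lemma pvRank_contains (r : String) : pvRank.contains r = true ↔ r ∈ pvPrio := by
  rw [PySem.Dict.contains_iff_mem_keys, pvRank_keys]

-- B's else-branch equals "first element of ord available, else medium" whenever the key
-- is strictly increasing along ord and ord has the same members as the rank dict's keys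
lemma pvBridge (ord avail : List String) (key : String → Int)
    (hs : List.Pairwise (fun a b => key a < key b) ord)
    (hmem : ∀ r, pvRank.contains r = true ↔ r ∈ ord) :
    (if (avail.filter (fun r => pvRank.contains r)).isEmpty then "medium"
     else
       match PySem.List.min? (avail.filter (fun r => pvRank.contains r)) key with
       | some res => res
       | none => "medium")
      = (ord.find? avail.contains).getD "medium" := by
  by_cases hcs : (avail.filter (fun r => pvRank.contains r)).isEmpty
  · have hempty : avail.filter (fun r => pvRank.contains r) = [] := List.isEmpty_iff.1 hcs
    have hford : ord.find? avail.contains = none := by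
      apply List.find?_eq_none.2
      intro x hxord hxav
      have hxcs : x ∈ avail.filter (fun r => pvRank.contains r) :=
        List.mem_filter.2 ⟨by simpa using hxav, (hmem x).2 hxord⟩
      simp [hempty] at hxcs
    simp [hcs, hford]
  · cases hmin : PySem.List.min? (avail.filter (fun r => pvRank.contains r)) key with
    | none =>
      exact absurd ((PySem.List.min?_eq_none_iff _ _).1 hmin)
        (fun h => hcs (by simp [h]))
    | some m =>
      have hmcs := PySem.List.min?_mem hmin
      have hmav : m ∈ avail := (List.mem_filter.1 hmcs).1
      have hmord : m ∈ ord := (hmem m).1 (List.mem_filter.1 hmcs).2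
      have hsome : (ord.find? avail.contains).isSome :=
        List.find?_isSome.2 ⟨m, hmord, by simpa using hmav⟩
      obtain ⟨f, hf⟩ := Option.isSome_iff_exists.1 hsome
      obtain ⟨hqf, l1, l2, he, hall⟩ := List.find?_eq_some_iff_append.1 hf
      have hfav : f ∈ avail := by simpa using hqf
      have hford : f ∈ ord := by rw [he]; simp
      have hfcs : f ∈ avail.filter (fun r => pvRank.contains r) :=
        List.mem_filter.2 ⟨hfav, (hmem f).2 hford⟩
      have hkmf : key m ≤ key f := PySem.List.min?_isMin hmin f hfcs
      have hm2 : m ∈ f :: l2 := by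
        have hmord' := hmord
        rw [he] at hmord'
        rcases List.mem_append.1 hmord' with h | h
        · exact absurd (by simpa using hmav) (by simpa using hall m h)
        · exact h
      rcases List.mem_cons.1 hm2 with rfl | hml2
      · simp [hcs, hf]
      · exfalso
        have hp : List.Pairwise (fun a b => key a < key b) (f :: l2) :=
          (List.pairwise_append.1 (he ▸ hs)).2.1
        have hlt : key f < key m := (List.pairwise_cons.1 hp).1 m hml2
        omega

lemma pvRank_notmem_getD (r : String) (h : r ∉ pvPrio) : pvRank.getD r 0 = 0 := by
  apply PySem.Dict.getD_of_not_contains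
  by_contra hb
  exact h ((pvRank_contains r).1 (by simpa using hb))

lemma pvMatchA0 (avail : List String) :
    (match pvFirstAvail pvPrio avail with | some res => res | none => "medium")
      = (pvPrio.find? avail.contains).getD "medium" := by
  rw [pvFirstAvail_eq]
  cases h : pvPrio.find? avail.contains <;> simp

-- ===== VERDICT (by name: the statement is the Claim_ definition above) =====
theorem find_best_available_resolution_py_spec : Claim_equal_find_best_available_resolution_py := by
  intro req avail _
  unfold Spec_find_best_available_resolution_py
  unfold find_best_available_resolution_py find_best_available_resolution_py_alt
  by_cases hc : req ∈ avail
  · simp [hc]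
  · have hcb : avail.contains req = false := by simpa using hc
    simp only [hcb, Bool.false_eq_true, if_false]
    cases hidx : PySem.List.index? pvPrio req with
    | none =>
      have hreq : req ∉ pvPrio := (PySem.List.index?_eq_none_iff _ _).1 hidx
      simp only [pvMatchA0, pvRank_notmem_getD req hreq]
      exact (pvBridge pvPrio avail _ (by decide) (fun r => pvRank_contains r)).symm
    | some k =>
      obtain ⟨hk, hget, -⟩ := PySem.List.getElem_of_index?_eq_some hidx
      have hk9 : k < 9 := by simpa [pvPrio] using hk
      interval_cases k
      · simp only [pvPrio, List.getElem_cons_zero] at hget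
        subst hget
        exact (pvA_eq 0 avail).trans (pvBridge (pvOrd 0) avail _ (by decide)
          (fun r => (pvRank_contains r).trans
            ⟨fun h => pvPrio_sub_pvOrd 0 r h, fun h => pvOrd_sub_pvPrio 0 r (by decide) h⟩)).symm
      · simp only [pvPrio, List.getElem_cons_zero, List.getElem_cons_succ] at hget
        subst hget
        exact (pvA_eq 1 avail).trans (pvBridge (pvOrd 1) avail _ (by decide)
          (fun r => (pvRank_contains r).trans
            ⟨fun h => pvPrio_sub_pvOrd 1 r h, fun h => pvOrd_sub_pvPrio 1 r (by decide) h⟩)).symm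
      · simp only [pvPrio, List.getElem_cons_zero, List.getElem_cons_succ] at hget
        subst hget
        exact (pvA_eq 2 avail).trans (pvBridge (pvOrd 2) avail _ (by decide)
          (fun r => (pvRank_contains r).trans
            ⟨fun h => pvPrio_sub_pvOrd 2 r h, fun h => pvOrd_sub_pvPrio 2 r (by decide) h⟩)).symm
      · simp only [pvPrio, List.getElem_cons_zero, List.getElem_cons_succ] at hget
        subst hget
        exact (pvA_eq 3 avail).trans (pvBridge (pvOrd 3) avail _ (by decide)
          (fun r => (pvRank_contains r).trans
            ⟨fun h => pvPrio_sub_pvOrd 3 r h, fun h => pvOrd_sub_pvPrio 3 r (by decide) h⟩)).symm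
      · simp only [pvPrio, List.getElem_cons_zero, List.getElem_cons_succ] at hget
        subst hget
        exact (pvA_eq 4 avail).trans (pvBridge (pvOrd 4) avail _ (by decide)
          (fun r => (pvRank_contains r).trans
            ⟨fun h => pvPrio_sub_pvOrd 4 r h, fun h => pvOrd_sub_pvPrio 4 r (by decide) h⟩)).symm
      · simp only [pvPrio, List.getElem_cons_zero, List.getElem_cons_succ] at hget
        subst hget
        exact (pvA_eq 5 avail).trans (pvBridge (pvOrd 5) avail _ (by decide)
          (fun r => (pvRank_contains r).trans
            ⟨fun h => pvPrio_sub_pvOrd 5 r h, fun h => pvOrd_sub_pvPrio 5 r (by decide) h⟩)).symm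
      · simp only [pvPrio, List.getElem_cons_zero, List.getElem_cons_succ] at hget
        subst hget
        exact (pvA_eq 6 avail).trans (pvBridge (pvOrd 6) avail _ (by decide)
          (fun r => (pvRank_contains r).trans
            ⟨fun h => pvPrio_sub_pvOrd 6 r h, fun h => pvOrd_sub_pvPrio 6 r (by decide) h⟩)).symm
      · simp only [pvPrio, List.getElem_cons_zero, List.getElem_cons_succ] at hget
        subst hget
        exact (pvA_eq 7 avail).trans (pvBridge (pvOrd 7) avail _ (by decide)
          (fun r => (pvRank_contains r).trans
            ⟨fun h => pvPrio_sub_pvOrd 7 r h, fun h => pvOrd_sub_pvPrio 7 r (by decide) h⟩)).symm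
      · simp only [pvPrio, List.getElem_cons_zero, List.getElem_cons_succ] at hget
        subst hget
        exact (pvA_eq 8 avail).trans (pvBridge (pvOrd 8) avail _ (by decide)
          (fun r => (pvRank_contains r).trans
            ⟨fun h => pvPrio_sub_pvOrd 8 r h, fun h => pvOrd_sub_pvPrio 8 r (by decide) h⟩)).symm
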